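-- pv_equiv track=rewrite | github.com/punk1503/Decoder1.8 | Decoder1-8.py | ascii_convert
-- ===== SOURCE A (Python) =====
-- def ascii_convert(ndx):
--
--     key=list(range(32,127))
--     key=key+list(range(192,256))
--
--     value=[chr(i) for i in range(32, 127)]
--     value=value+list([chr(i) for i in range(1040, 1104)])
--
--     ascii_codes=dict(zip(key, value))
--     if int(ndx) in ascii_codes:
--         return ascii_codes[int(ndx)]
--     else:
--         return '`'
-- ===== SOURCE B (Python) =====
-- def ascii_convert(ndx):
--     n = int(ndx)
--     if 32 <= n <= 126:
--         return chr(n)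
--     elif 192 <= n <= 255:
--         return chr(n - 192 + 1040)
--     else:
--         return '`'
-- ===== Notes on version B (the rewrite author's own statement) =====
-- stated objective: simpler
-- what changed: Replaced the table A rebuilds on every call (two key ranges zipped with lists of chr values, then a dict lookup) by a direct two-range branch: chr of the index in the printable-ASCII block, chr of the shifted index in the Cyrillic block, and a backtick otherwise.
import Mathlib
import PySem

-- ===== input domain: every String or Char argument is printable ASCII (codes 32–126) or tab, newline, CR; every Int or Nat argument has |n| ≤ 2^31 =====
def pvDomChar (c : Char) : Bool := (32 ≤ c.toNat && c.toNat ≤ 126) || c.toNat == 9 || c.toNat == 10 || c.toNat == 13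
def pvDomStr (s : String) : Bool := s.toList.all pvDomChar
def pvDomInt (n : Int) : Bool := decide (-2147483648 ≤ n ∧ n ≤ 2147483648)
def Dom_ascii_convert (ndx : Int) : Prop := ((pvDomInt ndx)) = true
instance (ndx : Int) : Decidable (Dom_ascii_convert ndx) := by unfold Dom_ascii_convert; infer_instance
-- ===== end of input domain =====

set_option maxRecDepth 100000

-- B replaces A's per-call dict-of-ranges table by a closed-form two-range branch (objective: simpler).

-- chr(i) ported by hand as one-character string via Char.ofNat (exact for the code points 32–126 and 1040–1103 used here)
def pvChr (i : Int) : String := String.ofList [Char.ofNat i.toNat]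

-- ===== PORT A =====
def ascii_convert (ndx : Int) : String :=
  let key := PySem.List.pyRange 32 127 1
  let key := key ++ PySem.List.pyRange 192 256 1
  let value := (PySem.List.pyRange 32 127 1).map pvChr
  let value := value ++ (PySem.List.pyRange 1040 1104 1).map pvChr
  let ascii_codes := PySem.Dict.ofList (key.zip value)
  -- int(ndx) = ndx for an int argument; dict[k] after the 'in' check is get?.getD (KeyError unreachable)
  if ascii_codes.contains ndx then ((ascii_codes.get? ndx).getD "`") else "`"

-- ===== PORT B =====
def ascii_convert_alt (ndx : Int) : String :=
  if 32 ≤ ndx ∧ ndx ≤ 126 then pvChr ndx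
  else if 192 ≤ ndx ∧ ndx ≤ 255 then pvChr (ndx - 192 + 1040)
  else "`"

-- ===== PRECONDITION & SPEC =====
def Spec_ascii_convert (ndx : Int) (out : String) : Prop := out = ascii_convert_alt ndx
instance (ndx : Int) (out : String) : Decidable (Spec_ascii_convert ndx out) := by unfold Spec_ascii_convert; infer_instance

-- ===== CLAIM (what is proved, stated in full; the proofs are below) =====
def Claim_equal_ascii_convert : Prop := ∀ (ndx : Int), Dom_ascii_convert ndx → Spec_ascii_convert ndx (ascii_convert ndx)

-- ===== LEMMAS AND PROOFS =====

-- the dict A builds, as a plain assoc list (ofList inserts only fresh keys here)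
theorem pv_ofList_eq_mk :
    PySem.Dict.ofList
      ((PySem.List.pyRange 32 127 1 ++ PySem.List.pyRange 192 256 1).zip
        ((PySem.List.pyRange 32 127 1).map pvChr ++ (PySem.List.pyRange 1040 1104 1).map pvChr)) =
    PySem.Dict.mk
      ((PySem.List.pyRange 32 127 1 ++ PySem.List.pyRange 192 256 1).zip
        ((PySem.List.pyRange 32 127 1).map pvChr ++ (PySem.List.pyRange 1040 1104 1).map pvChr)) := by
  decide

theorem pv_get?_mk_append {ν : Type} (l1 l2 : List (Int × ν)) (n : Int) :
    (PySem.Dict.mk (l1 ++ l2)).get? n =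
      ((PySem.Dict.mk l1).get? n).orElse (fun _ => (PySem.Dict.mk l2).get? n) := by
  induction l1 with
  | nil => simp [PySem.Dict.get?, Option.orElse]
  | cons p l1 ih =>
      obtain ⟨k, v⟩ := p
      rw [List.cons_append, PySem.Dict.get?_mk_cons, PySem.Dict.get?_mk_cons]
      by_cases h : k == n <;> simp [h, ih, Option.orElse]

theorem pv_get?_mk_zip (b : Int) (vs : List String) (n : Int) : ∀ (a : Int),
    vs.length = (b - a).toNat →
    (PySem.Dict.mk ((PySem.List.pyRange a b 1).zip vs)).get? n =
      if a ≤ n ∧ n < b then vs[(n - a).toNat]? else none := by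
  induction vs with
  | nil =>
      intro a h
      simp only [List.length_nil] at h
      rw [if_neg (by omega)]
      simp [PySem.List.pyRange_one, show (b - a).toNat = 0 by omega, PySem.Dict.get?]
  | cons v vs ih =>
      intro a h
      simp only [List.length_cons] at h
      have hab : a < b := by omega
      rw [PySem.List.pyRange_one_cons hab, List.zip_cons_cons, PySem.Dict.get?_mk_cons,
        ih (a + 1) (by omega)]
      by_cases hn : a = n
      · subst hn
        simp [hab]
      · rw [if_neg (by simpa using hn)]
        by_cases hin : a ≤ n ∧ n < b
        · rw [if_pos ⟨by omega, hin.2⟩, if_pos hin,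
            show (n - a).toNat = (n - (a + 1)).toNat + 1 by omega]
          simp
        · rw [if_neg (by omega), if_neg hin]

theorem pv_chr_pyRange (a b : Int) (k : Nat) (hk : k < (b - a).toNat) :
    ((PySem.List.pyRange a b 1).map pvChr)[k]? = some (pvChr (a + k)) := by
  simp [PySem.List.pyRange_one, hk]

theorem ascii_convert_eq_alt (n : Int) : ascii_convert n = ascii_convert_alt n := by
  simp only [ascii_convert, ascii_convert_alt]
  rw [pv_ofList_eq_mk, PySem.Dict.contains_eq_isSome_get?,
    List.zip_append (by simp [PySem.List.length_pyRange_one]),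
    pv_get?_mk_append,
    pv_get?_mk_zip 127 _ n 32 (by simp [PySem.List.length_pyRange_one]),
    pv_get?_mk_zip 256 _ n 192 (by simp [PySem.List.length_pyRange_one])]
  by_cases h1 : 32 ≤ n ∧ n ≤ 126
  · rw [if_pos (show (32:Int) ≤ n ∧ n < 127 from ⟨h1.1, by omega⟩),
      pv_chr_pyRange 32 127 (n - 32).toNat (by omega), if_pos h1]
    simp only [Option.orElse, Option.getD_some, Option.isSome_some, if_true]
    congr 1
    omega
  · rw [if_neg (show ¬((32:Int) ≤ n ∧ n < 127) by omega), if_neg h1]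
    by_cases h2 : 192 ≤ n ∧ n ≤ 255
    · rw [if_pos (show (192:Int) ≤ n ∧ n < 256 from ⟨h2.1, by omega⟩),
        pv_chr_pyRange 1040 1104 (n - 192).toNat (by omega), if_pos h2]
      simp only [Option.orElse, Option.getD_some, Option.isSome_some, if_true]
      congr 1
      omega
    · rw [if_neg (show ¬((192:Int) ≤ n ∧ n < 256) by omega), if_neg h2]
      simp [Option.orElse]

-- ===== VERDICT (by name: the statement is the Claim_ definition above) =====
theorem ascii_convert_spec : Claim_equal_ascii_convert := by
  intro n _
  unfold Spec_ascii_convert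
  exact ascii_convert_eq_alt n
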